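-- pv_equiv track=rewrite | github.com/JochenWeerda/VALEO-NeuroERP-3.0 | app/risk_management/assessment.py | _generate_risk_compliance_recommendations
-- ===== SOURCE A (Python) =====
-- from typing import Dict, Any, List, Optional, Tuple
--
-- def _generate_risk_compliance_recommendations(issues: List[str]) -> List[str]:
--     """Generate risk management compliance recommendations"""
--     recommendations = []
--
--     if any('assessment' in issue.lower() for issue in issues):
--         recommendations.append("Conduct comprehensive risk assessments covering all information assets and processes")
--
--     if any('treatment' in issue.lower() for issue in issues):
--         recommendations.append("Develop and implement risk treatment plans for all high-risk items")
--
--     if any('monitoring' in issue.lower() for issue in issues):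
--         recommendations.append("Establish regular risk monitoring and review processes")
--
--     if any('appetite' in issue.lower() for issue in issues):
--         recommendations.append("Define organizational risk appetite for all risk categories")
--
--     recommendations.append("Maintain regular risk management reviews and updates to the risk register")
--
--     return recommendations
-- ===== SOURCE B (Python) =====
-- def _generate_risk_compliance_recommendations(issues):
--     """Generate risk management compliance recommendations (single pass over issues)."""
--     has_assessment = has_treatment = has_monitoring = has_appetite = False
--     for issue in issues:
--         low = issue.lower()
--         if 'assessment' in low:
--             has_assessment = True
--         if 'treatment' in low:
--             has_treatment = True
--         if 'monitoring' in low: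
--             has_monitoring = True
--         if 'appetite' in low:
--             has_appetite = True
--     recommendations = []
--     if has_assessment:
--         recommendations.append("Conduct comprehensive risk assessments covering all information assets and processes")
--     if has_treatment:
--         recommendations.append("Develop and implement risk treatment plans for all high-risk items")
--     if has_monitoring:
--         recommendations.append("Establish regular risk monitoring and review processes")
--     if has_appetite:
--         recommendations.append("Define organizational risk appetite for all risk categories")
--     recommendations.append("Maintain regular risk management reviews and updates to the risk register")
--     return recommendations
-- ===== Notes on version B (the rewrite author's own statement) =====
-- stated objective: faster
-- what changed: Replaces four separate full scans of issues (each re-lowercasing every element) with a single accumulating pass that lowercases each element once and sets four boolean flags, then emits the recommendations from the flags.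
import Mathlib
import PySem

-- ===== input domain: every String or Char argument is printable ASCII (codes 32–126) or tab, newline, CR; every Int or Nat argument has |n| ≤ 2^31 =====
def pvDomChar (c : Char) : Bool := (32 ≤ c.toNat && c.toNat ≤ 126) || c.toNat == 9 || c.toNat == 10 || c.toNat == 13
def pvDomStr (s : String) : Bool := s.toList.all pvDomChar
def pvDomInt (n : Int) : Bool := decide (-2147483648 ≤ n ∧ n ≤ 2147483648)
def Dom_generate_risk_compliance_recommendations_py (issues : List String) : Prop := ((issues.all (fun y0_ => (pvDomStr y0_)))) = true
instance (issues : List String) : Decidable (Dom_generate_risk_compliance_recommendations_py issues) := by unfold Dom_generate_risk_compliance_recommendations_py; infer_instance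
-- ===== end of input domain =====

-- B replaces A's four separate scans of `issues` with one flag-setting pass (objective: faster, constant factor).

-- ===== PORT A =====
-- A: four independent `any('kw' in issue.lower() for issue in issues)` tests, appending in fixed order.
def generate_risk_compliance_recommendations_py (issues : List String) : List String :=
  let recommendations : List String := []
  let recommendations :=
    if issues.any (fun issue => PySem.Str.isIn "assessment" (PySem.Str.lower issue)) then
      recommendations ++ ["Conduct comprehensive risk assessments covering all information assets and processes"]
    else recommendations
  let recommendations :=
    if issues.any (fun issue => PySem.Str.isIn "treatment" (PySem.Str.lower issue)) then
      recommendations ++ ["Develop and implement risk treatment plans for all high-risk items"]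
    else recommendations
  let recommendations :=
    if issues.any (fun issue => PySem.Str.isIn "monitoring" (PySem.Str.lower issue)) then
      recommendations ++ ["Establish regular risk monitoring and review processes"]
    else recommendations
  let recommendations :=
    if issues.any (fun issue => PySem.Str.isIn "appetite" (PySem.Str.lower issue)) then
      recommendations ++ ["Define organizational risk appetite for all risk categories"]
    else recommendations
  recommendations ++ ["Maintain regular risk management reviews and updates to the risk register"]

-- ===== PORT B =====
-- B: one fold over issues, lowercasing each element once and accumulating four boolean flags.
def pvFlagsStep (f : Bool × Bool × Bool × Bool) (issue : String) : Bool × Bool × Bool × Bool :=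
  let low := PySem.Str.lower issue
  ((if PySem.Str.isIn "assessment" low then true else f.1),
   (if PySem.Str.isIn "treatment" low then true else f.2.1),
   (if PySem.Str.isIn "monitoring" low then true else f.2.2.1),
   (if PySem.Str.isIn "appetite" low then true else f.2.2.2))

def generate_risk_compliance_recommendations_py_alt (issues : List String) : List String :=
  let flags := issues.foldl pvFlagsStep (false, false, false, false)
  let recommendations : List String := []
  let recommendations := if flags.1 then
      recommendations ++ ["Conduct comprehensive risk assessments covering all information assets and processes"]
    else recommendations
  let recommendations := if flags.2.1 then
      recommendations ++ ["Develop and implement risk treatment plans for all high-risk items"]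
    else recommendations
  let recommendations := if flags.2.2.1 then
      recommendations ++ ["Establish regular risk monitoring and review processes"]
    else recommendations
  let recommendations := if flags.2.2.2 then
      recommendations ++ ["Define organizational risk appetite for all risk categories"]
    else recommendations
  recommendations ++ ["Maintain regular risk management reviews and updates to the risk register"]

-- ===== PRECONDITION & SPEC =====
def Spec_generate_risk_compliance_recommendations_py (issues : List String) (out : List String) : Prop := out = generate_risk_compliance_recommendations_py_alt issues
instance (issues : List String) (out : List String) : Decidable (Spec_generate_risk_compliance_recommendations_py issues out) := by unfold Spec_generate_risk_compliance_recommendations_py; infer_instance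

-- ===== CLAIM (what is proved, stated in full; the proofs are below) =====
def Claim_equal_generate_risk_compliance_recommendations_py : Prop := ∀ (issues : List String), Dom_generate_risk_compliance_recommendations_py issues → Spec_generate_risk_compliance_recommendations_py issues (generate_risk_compliance_recommendations_py issues)

-- ===== LEMMAS AND PROOFS =====

-- The flag fold computes exactly the four `any` tests (disjoined with the accumulator).
theorem pvFlags_eq (issues : List String) (f : Bool × Bool × Bool × Bool) :
    issues.foldl pvFlagsStep f =
      ((f.1 || issues.any (fun i => PySem.Str.isIn "assessment" (PySem.Str.lower i))),
       (f.2.1 || issues.any (fun i => PySem.Str.isIn "treatment" (PySem.Str.lower i))),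
       (f.2.2.1 || issues.any (fun i => PySem.Str.isIn "monitoring" (PySem.Str.lower i))),
       (f.2.2.2 || issues.any (fun i => PySem.Str.isIn "appetite" (PySem.Str.lower i)))) := by
  induction issues generalizing f with
  | nil => simp
  | cons x xs ih =>
    simp only [List.foldl_cons, ih, List.any_cons, pvFlagsStep]
    cases f.1 <;> cases f.2.1 <;> cases f.2.2.1 <;> cases f.2.2.2 <;> simp

-- ===== VERDICT (by name: the statement is the Claim_ definition above) =====
theorem generate_risk_compliance_recommendations_py_spec : Claim_equal_generate_risk_compliance_recommendations_py := by
  intro issues _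
  unfold Spec_generate_risk_compliance_recommendations_py
  unfold generate_risk_compliance_recommendations_py generate_risk_compliance_recommendations_py_alt
  simp only [pvFlags_eq, Bool.false_or]
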